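-- pv_equiv track=rewrite | github.com/Tommy1908/IntroProgramacionCC | practicaParcialesPython/2doCuatriSimulacro2023.py | contar_traducciones_iguales
-- ===== SOURCE A (Python) =====
-- def contar_traducciones_iguales(ding: dict[str,str], dale: dict[str,str]) -> int:
--     res:int = 0
--     valores_ingles: list[str] = []
--     for k,v in ding.items():
--         if k in dale:
--             if ding[k] == dale[k]:
--                 res += 1
--
--     return res
-- ===== SOURCE B (Python) =====
-- def contar_traducciones_iguales(ding: dict[str, str], dale: dict[str, str]) -> int:
--     # Sort both key sequences and count key matches with a two-pointer merge.
--     a = sorted(ding)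
--     b = sorted(dale)
--     i = 0
--     j = 0
--     res = 0
--     while i < len(a) and j < len(b):
--         if a[i] < b[j]:
--             i += 1
--         elif b[j] < a[i]:
--             j += 1
--         else:
--             if ding[a[i]] == dale[a[i]]:
--                 res += 1
--             i += 1
--             j += 1
--     return res
-- ===== Notes on version B (the rewrite author's own statement) =====
-- stated objective: alternative
-- what changed: B sorts the two key sequences and counts equal-valued common keys with a two-pointer merge over the sorted lists, instead of A's hash-membership loop over ding's items; correct because each dict's keys are unique, so sorted common keys align exactly once in the merge.
import Mathlib
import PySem

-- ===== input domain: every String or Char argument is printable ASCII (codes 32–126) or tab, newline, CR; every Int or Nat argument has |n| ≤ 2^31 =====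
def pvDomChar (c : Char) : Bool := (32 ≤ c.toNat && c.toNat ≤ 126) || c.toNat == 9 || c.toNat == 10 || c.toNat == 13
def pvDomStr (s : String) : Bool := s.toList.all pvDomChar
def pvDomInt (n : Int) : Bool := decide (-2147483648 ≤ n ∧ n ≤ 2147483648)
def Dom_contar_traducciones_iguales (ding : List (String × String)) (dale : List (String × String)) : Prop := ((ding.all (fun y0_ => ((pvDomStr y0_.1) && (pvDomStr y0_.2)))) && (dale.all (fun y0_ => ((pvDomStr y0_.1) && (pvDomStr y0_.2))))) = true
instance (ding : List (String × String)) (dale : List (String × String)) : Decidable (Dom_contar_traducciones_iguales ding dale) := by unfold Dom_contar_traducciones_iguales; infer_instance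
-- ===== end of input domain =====

-- B sorts both key sequences and counts equal-valued common keys with a two-pointer merge,
-- instead of A's membership-test loop over ding's items (objective: alternative algorithm).


-- ===== PORT A =====
-- for k,v in ding.items(): if k in dale: if ding[k] == dale[k]: res += 1
-- ding[k]/dale[k] are total here (k is a key of ding; the guard puts k in dale), so getD is exact.
def contar_traducciones_iguales (ding : List (String × String)) (dale : List (String × String)) : Int :=
  ding.foldl (fun res kv =>
    if (PySem.Dict.mk dale).contains kv.1 then
      if (PySem.Dict.mk ding).getD kv.1 "" == (PySem.Dict.mk dale).getD kv.1 "" then res + 1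
      else res
    else res) 0

-- ===== PORT B =====
-- the while loop of Source B: two pointers over the two sorted key lists, res accumulator;
-- advancing a pointer = dropping the head of the corresponding list
def pvMergeB (ding dale : PySem.Dict String String) :
    List String → List String → Int → Int
  | [], _, res => res
  | _ :: _, [], res => res
  | x :: xs, y :: ys, res =>
    if x < y then pvMergeB ding dale xs (y :: ys) res
    else if y < x then pvMergeB ding dale (x :: xs) ys res
    else pvMergeB ding dale xs ys
      (if ding.getD x "" == dale.getD x "" then res + 1 else res)
  termination_by xs ys _ => xs.length + ys.length

-- a = sorted(ding); b = sorted(dale); two-pointer merge counting equal-valued key matches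
def contar_traducciones_iguales_alt (ding : List (String × String)) (dale : List (String × String)) : Int :=
  pvMergeB (PySem.Dict.mk ding) (PySem.Dict.mk dale)
    (PySem.List.sorted (PySem.Dict.mk ding).keys (fun k => k) false)
    (PySem.List.sorted (PySem.Dict.mk dale).keys (fun k => k) false)
    0

-- ===== PRECONDITION & SPEC =====
-- Pre_ excludes association lists with duplicate keys: they do not represent any Python dict
-- (dict construction collapses duplicates), so neither program's behaviour there is Python's.
def Pre_contar_traducciones_iguales (ding : List (String × String)) (dale : List (String × String)) : Prop :=
  (ding.map Prod.fst).Nodup ∧ (dale.map Prod.fst).Nodup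
instance (ding : List (String × String)) (dale : List (String × String)) : Decidable (Pre_contar_traducciones_iguales ding dale) := by unfold Pre_contar_traducciones_iguales; infer_instance

def pvWitness_contar_traducciones_iguales : (List (String × String)) × (List (String × String)) :=
  ([("casa", "house"), ("perro", "dog")], [("casa", "house"), ("gato", "cat")])

def Spec_contar_traducciones_iguales (ding : List (String × String)) (dale : List (String × String)) (out : Int) : Prop := out = contar_traducciones_iguales_alt ding dale
instance (ding : List (String × String)) (dale : List (String × String)) (out : Int) : Decidable (Spec_contar_traducciones_iguales ding dale out) := by unfold Spec_contar_traducciones_iguales; infer_instance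

-- ===== CLAIM (what is proved, stated in full; the proofs are below) =====
def Claim_equal_contar_traducciones_iguales : Prop := ∀ (ding : List (String × String)) (dale : List (String × String)), Dom_contar_traducciones_iguales ding dale → Pre_contar_traducciones_iguales ding dale → Spec_contar_traducciones_iguales ding dale (contar_traducciones_iguales ding dale)

-- ===== LEMMAS AND PROOFS =====

-- The merge over strictly increasing key lists counts exactly the xs-keys that occur in ys
-- and whose two translations agree.
theorem pvMergeB_count (ding dale : PySem.Dict String String)
    (xs ys : List String) (res : Int)
    (hx : xs.Pairwise (· < ·)) (hy : ys.Pairwise (· < ·)) :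
    pvMergeB ding dale xs ys res =
      res + ((xs.countP (fun k => ys.contains k && (ding.getD k "" == dale.getD k ""))) : Int) := by
  induction xs, ys, res using pvMergeB.induct ding dale with
  | case1 ys res => simp [pvMergeB]
  | case2 x xs res => simp [pvMergeB]
  | case3 x xs y ys res hlt ih =>
    have hxy : ¬ (x ∈ y :: ys) := by
      intro hmem
      rcases List.mem_cons.mp hmem with rfl | hmem
      · exact lt_irrefl x hlt
      · exact absurd hlt (not_lt.mpr (le_of_lt (List.rel_of_pairwise_cons hy hmem)))
    have hxc : ((y :: ys).contains x) = false := by simpa [List.contains_eq_mem] using hxy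
    rw [pvMergeB, if_pos hlt, ih hx.tail hy,
      List.countP_cons_of_neg (by simp only [hxc, Bool.false_and]; exact Bool.false_ne_true)]
  | case4 x xs y ys res hnlt hlt ih =>
    have hmemeq : ∀ k ∈ x :: xs, ((y :: ys).contains k : Bool) = (ys.contains k : Bool) := by
      intro k hk
      have hyk : y < k := by
        rcases List.mem_cons.mp hk with rfl | hk
        · exact hlt
        · exact lt_trans hlt (List.rel_of_pairwise_cons hx hk)
      simp [List.contains_eq_mem, ne_of_gt hyk]
    rw [pvMergeB, if_neg hnlt, if_pos hlt, ih hx hy.tail]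
    congr 2
    apply List.countP_congr
    intro k hk
    rw [hmemeq k hk]
  | case5 x xs y ys res hnlt hnlt' ih =>
    have hxy : x = y := le_antisymm (not_lt.mp hnlt') (not_lt.mp hnlt)
    subst hxy
    have hmemeq : ∀ k ∈ xs, ((x :: ys).contains k : Bool) = (ys.contains k : Bool) := by
      intro k hk
      have : x < k := List.rel_of_pairwise_cons hx hk
      simp [List.contains_eq_mem, (ne_of_gt this)]
    have ih' := ih hx.tail hy.tail
    simp only [dite_eq_ite] at ih'
    have hcnt : (xs.countP (fun k => (x :: ys).contains k && (ding.getD k "" == dale.getD k "")))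
        = (xs.countP (fun k => ys.contains k && (ding.getD k "" == dale.getD k ""))) := by
      apply List.countP_congr
      intro k hk
      rw [hmemeq k hk]
    rw [pvMergeB, if_neg hnlt, if_neg hnlt', ih']
    by_cases hv : (ding.getD x "" == dale.getD x "") = true
    · rw [if_pos hv,
        List.countP_cons_of_pos (by simp [List.contains_eq_mem, hv]), hcnt]
      push_cast
      ring
    · rw [if_neg hv,
        List.countP_cons_of_neg (by simp [hv]), hcnt]

-- a strictly increasing Pairwise from ≤-sortedness plus Nodup
theorem pairwise_lt_of_sorted_nodup (xs : List String) (h : xs.Nodup) :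
    (PySem.List.sorted xs (fun k => k) false).Pairwise (· < ·) := by
  have hle : (PySem.List.sorted xs (fun k => k) false).Pairwise (fun a b => a ≤ b) :=
    PySem.List.sorted_pairwise xs (fun k => k)
  have hnd : (PySem.List.sorted xs (fun k => k) false).Nodup :=
    (PySem.List.sorted_perm xs (fun k => k) false).nodup_iff.mpr h
  exact (hle.and hnd).imp (fun hab => lt_of_le_of_ne hab.1 hab.2)

-- ===== VERDICT (by name: the statement is the Claim_ definition above) =====
theorem contar_traducciones_iguales_spec : Claim_equal_contar_traducciones_iguales := by
  intro ding dale _ hpre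
  obtain ⟨h1, h2⟩ := hpre
  have hk1 : (PySem.Dict.mk ding).keys.Nodup := by simpa [PySem.Dict.keys] using h1
  have hk2 : (PySem.Dict.mk dale).keys.Nodup := by simpa [PySem.Dict.keys] using h2
  unfold Spec_contar_traducciones_iguales contar_traducciones_iguales contar_traducciones_iguales_alt
  -- A's loop is a countP over ding's items
  have hbody : (fun (res : Int) (kv : String × String) =>
      if (PySem.Dict.mk dale).contains kv.1 then
        if (PySem.Dict.mk ding).getD kv.1 "" == (PySem.Dict.mk dale).getD kv.1 "" then res + 1
        else res
      else res)
      = (fun (res : Int) (kv : String × String) =>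
        if ((PySem.Dict.mk dale).contains kv.1 &&
            ((PySem.Dict.mk ding).getD kv.1 "" == (PySem.Dict.mk dale).getD kv.1 "")) then res + 1
        else res) := by
    funext res kv
    by_cases hc : (PySem.Dict.mk dale).contains kv.1 <;> simp [hc]
  rw [hbody, PySem.List.foldl_if_add_one, zero_add]
  -- B's merge over the two sorted key lists is the same countP
  rw [pvMergeB_count _ _ _ _ _
        (pairwise_lt_of_sorted_nodup _ hk1) (pairwise_lt_of_sorted_nodup _ hk2), zero_add]
  congr 1
  rw [((PySem.List.sorted_perm (PySem.Dict.mk ding).keys (fun k => k) false)).countP_eq]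
  simp only [PySem.Dict.keys, List.countP_map]
  apply List.countP_congr
  intro kv _
  simp only [Function.comp, List.contains_eq_mem, PySem.List.mem_sorted,
    PySem.Dict.contains, List.contains_eq_mem, List.mem_map]
  constructor <;> intro h <;> simp_all
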